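-- pv_equiv track=rewrite | github.com/G-Just/Python-SHA_256 | SHA.py | sigma_0
-- ===== SOURCE A (Python) =====
-- def shift_r(n, word):
--     for i in range(0, n):
--         word = '0' + word
--         word = word[:-1:]
--     return word
--
-- def rotate_r(n, word):
--     for i in range(0, n):
--         word = word[-1] + word
--         word = word[:-1:]
--     return word
--
-- def sigma_0(word):
--     ans = ''
--     l1 = rotate_r(7, word)
--     l2 = rotate_r(18, word)
--     l3 = shift_r(3, word)
--     for i in range(0, len(word)):
--         if int(l1[i]) + int(l2[i]) + int(l3[i]) == 1 or int(l1[i]) + int(l2[i]) + int(l3[i]) == 3: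
--             ans += '1'
--         else:
--             ans += '0'
--     return ans
-- ===== SOURCE B (Python) =====
-- def sigma_0(word):
--     n = len(word)
--     d = [int(c) for c in word]
--     out = []
--     for i in range(n):
--         s = d[(i - 7) % n] + d[(i - 18) % n] + (d[i - 3] if i >= 3 else 0)
--         out.append('1' if s == 1 or s == 3 else '0')
--     return ''.join(out)
-- ===== Notes on version B (the rewrite author's own statement) =====
-- stated objective: faster
-- what changed: B precomputes the digit values once and reads each output bit by direct modular indexing ((i-7)%n, (i-18)%n, i-3) into that list, instead of A's building of three shifted/rotated strings by 28 one-character string-rebuild iterations and re-parsing int() six times per position.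
import Mathlib
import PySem

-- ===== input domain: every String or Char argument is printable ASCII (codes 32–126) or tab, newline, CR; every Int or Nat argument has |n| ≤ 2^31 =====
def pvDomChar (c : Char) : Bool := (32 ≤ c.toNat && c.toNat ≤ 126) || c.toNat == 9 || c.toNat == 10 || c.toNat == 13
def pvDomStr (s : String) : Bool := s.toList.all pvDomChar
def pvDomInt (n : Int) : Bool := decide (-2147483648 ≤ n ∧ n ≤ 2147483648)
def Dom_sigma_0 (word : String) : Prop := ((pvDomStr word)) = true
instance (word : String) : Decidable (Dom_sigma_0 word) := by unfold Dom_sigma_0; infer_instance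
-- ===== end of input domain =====

-- B replaces A's character-rotation loops by direct modular indexing into a once-computed digit list (one pass, no string rebuilds); return-value equivalence on nonempty digit strings.


-- ===== PORT A =====
-- Strings are handled on the List Char side throughout (PySem convention); int(c) on a
-- one-character string is PySem.Int.ofChars? [c], defaulted under Pre_ (all chars are digits,
-- so it is always `some` on admitted inputs).
def pvInt1 (c : Char) : Int := (PySem.Int.ofChars? [c]).getD 0

def shift_r (n : Int) (word : List Char) : List Char :=
  (PySem.List.pyRange 0 n 1).foldl (fun word _ =>
    -- word = '0' + word; word = word[:-1:]
    PySem.List.slice ('0' :: word) none (some (-1))) word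

def rotate_r (n : Int) (word : List Char) : List Char :=
  (PySem.List.pyRange 0 n 1).foldl (fun word _ =>
    -- word = word[-1] + word; word = word[:-1:]   (word[-1] defaulted under Pre_: word ≠ [])
    PySem.List.slice (PySem.List.pyGetD word (-1) '0' :: word) none (some (-1))) word

def sigma_0 (word : String) : String :=
  let w := word.toList
  let l1 := rotate_r 7 w
  let l2 := rotate_r 18 w
  let l3 := shift_r 3 w
  String.ofList <|
    (PySem.List.pyRange 0 (w.length : Int) 1).foldl (fun ans i =>
      if pvInt1 (PySem.List.pyGetD l1 i '0') + pvInt1 (PySem.List.pyGetD l2 i '0') +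
           pvInt1 (PySem.List.pyGetD l3 i '0') = 1 ∨
         pvInt1 (PySem.List.pyGetD l1 i '0') + pvInt1 (PySem.List.pyGetD l2 i '0') +
           pvInt1 (PySem.List.pyGetD l3 i '0') = 3
      then ans ++ ['1'] else ans ++ ['0']) []

-- ===== PORT B =====
def sigma_0_alt (word : String) : String :=
  let w := word.toList
  let n : Int := w.length
  let d := w.map pvInt1
  String.ofList <|
    (PySem.List.pyRange 0 n 1).foldl (fun out i =>
      let s := PySem.List.pyGetD d (PySem.Int.mod (i - 7) n) 0 +
               PySem.List.pyGetD d (PySem.Int.mod (i - 18) n) 0 +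
               (if 3 ≤ i then PySem.List.pyGetD d (i - 3) 0 else 0)
      out ++ [if s = 1 ∨ s = 3 then '1' else '0']) []

-- ===== PRECONDITION & SPEC =====
-- Pre_ is exactly where the Python A returns: A raises IndexError on '' (word[-1]) and
-- ValueError on any non-digit character (int(c)).
def Pre_sigma_0 (word : String) : Prop :=
  word.toList ≠ [] ∧ word.toList.all (fun c => c.isDigit) = true
instance (word : String) : Decidable (Pre_sigma_0 word) := by unfold Pre_sigma_0; infer_instance
def pvWitness_sigma_0 : String := "0110"

def Spec_sigma_0 (word : String) (out : String) : Prop := out = sigma_0_alt word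
instance (word : String) (out : String) : Decidable (Spec_sigma_0 word out) := by unfold Spec_sigma_0; infer_instance

-- ===== CLAIM (what is proved, stated in full; the proofs are below) =====
def Claim_equal_sigma_0 : Prop := ∀ (word : String), Dom_sigma_0 word → Pre_sigma_0 word → Spec_sigma_0 word (sigma_0 word)

-- ===== LEMMAS AND PROOFS =====

-- One rotate_r iteration on a nonempty list is a right rotation by one.
lemma pvRotStep {l : List Char} (h : l ≠ []) :
    PySem.List.slice (PySem.List.pyGetD l (-1) '0' :: l) none (some (-1)) =
      l.rotate (l.length - 1) := by
  rw [PySem.List.slice_to_neg_one]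
  rw [PySem.List.pyGetD_neg_one l '0' h]
  rw [List.rotate_eq_drop_append_take (by omega), List.drop_length_sub_one h]
  cases l with
  | nil => simp at h
  | cons a l => simp [List.dropLast_eq_take]

lemma pvRotFold (l : List Int) (w : List Char) (h : w ≠ []) :
    l.foldl (fun word _ =>
        PySem.List.slice (PySem.List.pyGetD word (-1) '0' :: word) none (some (-1))) w
      = w.rotate (l.length * (w.length - 1)) := by
  induction l generalizing w with
  | nil => simp
  | cons x l ih =>
    have hlen : (w.rotate (w.length - 1)).length = w.length := List.length_rotate ..
    have hne : w.rotate (w.length - 1) ≠ [] := by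
      intro hnil; apply h
      have := List.length_rotate w (w.length - 1)
      rw [hnil] at this
      exact List.eq_nil_of_length_eq_zero this.symm
    calc (x :: l).foldl _ w
        = l.foldl (fun word _ =>
            PySem.List.slice (PySem.List.pyGetD word (-1) '0' :: word) none (some (-1)))
            (w.rotate (w.length - 1)) := by rw [List.foldl_cons, pvRotStep h]
      _ = w.rotate ((x :: l).length * (w.length - 1)) := by
            rw [ih _ hne, hlen, List.rotate_rotate]
            congr 1
            simp [Nat.succ_mul]; ring
  
-- One shift_r iteration, as a take.
lemma pvShiftStep (l : List Char) :
    PySem.List.slice ('0' :: l) none (some (-1)) = ('0' :: l).take l.length := by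
  rw [PySem.List.slice_to_neg_one, List.dropLast_eq_take]
  simp

lemma pvTakeCons (a : Char) (l : List Char) (n : Nat) :
    (a :: l.take n).take n = (a :: l).take n := by
  cases n with
  | zero => simp
  | succ m => simp [List.take_succ_cons, List.take_take]

lemma pvShift3 (w : List Char) :
    shift_r 3 w = ('0' :: '0' :: '0' :: w).take w.length := by
  have h3 : PySem.List.pyRange 0 3 1 = [0, 1, 2] := by decide
  unfold shift_r
  rw [h3]
  simp only [List.foldl_cons, List.foldl_nil, pvShiftStep]
  simp only [List.length_take, List.length_cons]
  have hm : min w.length (w.length + 1) = w.length := by omega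
  rw [hm, pvTakeCons, hm, pvTakeCons]

lemma pvRot7 (w : List Char) (h : w ≠ []) :
    rotate_r 7 w = w.rotate (7 * (w.length - 1)) := by
  have : PySem.List.pyRange 0 7 1 = [0,1,2,3,4,5,6] := by decide
  unfold rotate_r
  rw [this, pvRotFold _ _ h]
  norm_num

lemma pvRot18 (w : List Char) (h : w ≠ []) :
    rotate_r 18 w = w.rotate (18 * (w.length - 1)) := by
  have : PySem.List.pyRange 0 18 1 = [0,1,2,3,4,5,6,7,8,9,10,11,12,13,14,15,16,17] := by decide
  unfold rotate_r
  rw [this, pvRotFold _ _ h]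
  norm_num

-- index equality behind a right-rotation by k
lemma pvIdxEq (k j n : Nat) (hn : 0 < n) :
    (j + k * (n - 1)) % n = (((j : Int) - (k : Int)) % (n : Int)).toNat := by
  have h1 : (((j + k * (n - 1)) % n : Nat) : Int) = ((j : Int) - k) % n := by
    push_cast [Nat.cast_sub hn]
    have h2 : (j : Int) + (k : Int) * ((n : Int) - 1) = ((j : Int) - k) + (n : Int) * k := by
      ring
    rw [h2, Int.add_mul_emod_self_left]
  rw [← h1, Int.toNat_natCast]

lemma pvIdxRot (k : Nat) (w : List Char) (hw : w ≠ []) (i : Int) (h0 : 0 ≤ i)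
    (hn : i < (w.length : Int)) :
    pvInt1 (PySem.List.pyGetD (w.rotate (k * (w.length - 1))) i '0')
      = PySem.List.pyGetD (w.map pvInt1) (PySem.Int.mod (i - (k : Int)) (w.length : Int)) 0 := by
  have hpos : (0 : Int) < (w.length : Int) := by
    have := List.length_pos_of_ne_nil hw; omega
  rw [PySem.Int.mod_eq_emod_of_pos hpos]
  have hm0 : 0 ≤ (i - (k : Int)) % (w.length : Int) := Int.emod_nonneg _ (by omega)
  have hmlt : (i - (k : Int)) % (w.length : Int) < (w.length : Int) :=
    Int.emod_lt_of_pos _ hpos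
  rw [PySem.List.pyGetD_eq_getElem _ _ h0 (by rw [List.length_rotate]; exact hn),
    PySem.List.pyGetD_eq_getElem _ _ hm0 (by rw [List.length_map]; exact hmlt),
    List.getElem_rotate, List.getElem_map]
  have hj : i = ((i.toNat : Nat) : Int) := by omega
  have hidx := pvIdxEq k i.toNat w.length (List.length_pos_of_ne_nil hw)
  rw [← hj] at hidx
  simp only [hidx]

lemma pvIdxShift (w : List Char) (i : Int) (h0 : 0 ≤ i) (hn : i < (w.length : Int)) :
    pvInt1 (PySem.List.pyGetD (('0' :: '0' :: '0' :: w).take w.length) i '0')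
      = if 3 ≤ i then PySem.List.pyGetD (w.map pvInt1) (i - 3) 0 else 0 := by
  have hlen : (('0' :: '0' :: '0' :: w).take w.length).length = w.length := by
    simp; omega
  rw [PySem.List.pyGetD_eq_getElem _ _ h0 (by rw [hlen]; exact hn)]
  by_cases h3 : 3 ≤ i
  · rw [if_pos h3]
    have h3' : 3 ≤ i.toNat := by omega
    have hjn : i.toNat < w.length := by omega
    have : (('0' :: '0' :: '0' :: w).take w.length)[i.toNat]'(by rw [hlen]; exact hjn)
        = w[i.toNat - 3]'(by omega) := by
      rw [List.getElem_take]
      exact List.getElem_append_right (as := ['0', '0', '0']) (bs := w) (by simpa using h3')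
    rw [this,
      PySem.List.pyGetD_eq_getElem _ _ (by omega) (by rw [List.length_map]; omega),
      List.getElem_map]
    congr 2
    omega
  · rw [if_neg h3]
    have hjn : i.toNat < w.length := by omega
    have : (('0' :: '0' :: '0' :: w).take w.length)[i.toNat]'(by rw [hlen]; exact hjn)
        = '0' := by
      rw [List.getElem_take]
      rcases (by omega : i.toNat = 0 ∨ i.toNat = 1 ∨ i.toNat = 2) with h | h | h <;> simp [h]
    rw [this]
    decide

-- ===== VERDICT (by name: the statement is the Claim_ definition above) =====
theorem sigma_0_spec : Claim_equal_sigma_0 := by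
  intro word _ hpre
  obtain ⟨hw, -⟩ := hpre
  unfold Spec_sigma_0
  simp only [sigma_0, sigma_0_alt]
  generalize word.toList = w at hw ⊢
  congr 1
  rw [pvRot7 w hw, pvRot18 w hw, pvShift3 w]
  have hA :
      (PySem.List.pyRange 0 (w.length : Int) 1).foldl (fun ans i =>
          if pvInt1 (PySem.List.pyGetD (w.rotate (7 * (w.length - 1))) i '0') +
               pvInt1 (PySem.List.pyGetD (w.rotate (18 * (w.length - 1))) i '0') +
               pvInt1 (PySem.List.pyGetD (('0' :: '0' :: '0' :: w).take w.length) i '0') = 1 ∨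
             pvInt1 (PySem.List.pyGetD (w.rotate (7 * (w.length - 1))) i '0') +
               pvInt1 (PySem.List.pyGetD (w.rotate (18 * (w.length - 1))) i '0') +
               pvInt1 (PySem.List.pyGetD (('0' :: '0' :: '0' :: w).take w.length) i '0') = 3
          then ans ++ ['1'] else ans ++ ['0']) []
        = (PySem.List.pyRange 0 (w.length : Int) 1).map (fun i =>
            if pvInt1 (PySem.List.pyGetD (w.rotate (7 * (w.length - 1))) i '0') +
                 pvInt1 (PySem.List.pyGetD (w.rotate (18 * (w.length - 1))) i '0') +
                 pvInt1 (PySem.List.pyGetD (('0' :: '0' :: '0' :: w).take w.length) i '0') = 1 ∨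
               pvInt1 (PySem.List.pyGetD (w.rotate (7 * (w.length - 1))) i '0') +
                 pvInt1 (PySem.List.pyGetD (w.rotate (18 * (w.length - 1))) i '0') +
                 pvInt1 (PySem.List.pyGetD (('0' :: '0' :: '0' :: w).take w.length) i '0') = 3
            then '1' else '0') := by
    rw [PySem.List.foldl_congr_mem _ _ (fun ans i =>
        ans ++ [if pvInt1 (PySem.List.pyGetD (w.rotate (7 * (w.length - 1))) i '0') +
               pvInt1 (PySem.List.pyGetD (w.rotate (18 * (w.length - 1))) i '0') +
               pvInt1 (PySem.List.pyGetD (('0' :: '0' :: '0' :: w).take w.length) i '0') = 1 ∨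
             pvInt1 (PySem.List.pyGetD (w.rotate (7 * (w.length - 1))) i '0') +
               pvInt1 (PySem.List.pyGetD (w.rotate (18 * (w.length - 1))) i '0') +
               pvInt1 (PySem.List.pyGetD (('0' :: '0' :: '0' :: w).take w.length) i '0') = 3
          then '1' else '0']) _ (by intro acc x _; split <;> rename_i hc <;> simp [hc]),
      PySem.List.foldl_append_singleton_eq_map, List.nil_append]
  have hB :
      (PySem.List.pyRange 0 (w.length : Int) 1).foldl (fun out i =>
          out ++ [if PySem.List.pyGetD (w.map pvInt1) (PySem.Int.mod (i - 7) (w.length : Int)) 0 +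
                     PySem.List.pyGetD (w.map pvInt1) (PySem.Int.mod (i - 18) (w.length : Int)) 0 +
                     (if 3 ≤ i then PySem.List.pyGetD (w.map pvInt1) (i - 3) 0 else 0) = 1 ∨
                   PySem.List.pyGetD (w.map pvInt1) (PySem.Int.mod (i - 7) (w.length : Int)) 0 +
                     PySem.List.pyGetD (w.map pvInt1) (PySem.Int.mod (i - 18) (w.length : Int)) 0 +
                     (if 3 ≤ i then PySem.List.pyGetD (w.map pvInt1) (i - 3) 0 else 0) = 3
                  then '1' else '0']) []
        = (PySem.List.pyRange 0 (w.length : Int) 1).map (fun i =>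
            if PySem.List.pyGetD (w.map pvInt1) (PySem.Int.mod (i - 7) (w.length : Int)) 0 +
                 PySem.List.pyGetD (w.map pvInt1) (PySem.Int.mod (i - 18) (w.length : Int)) 0 +
                 (if 3 ≤ i then PySem.List.pyGetD (w.map pvInt1) (i - 3) 0 else 0) = 1 ∨
               PySem.List.pyGetD (w.map pvInt1) (PySem.Int.mod (i - 7) (w.length : Int)) 0 +
                 PySem.List.pyGetD (w.map pvInt1) (PySem.Int.mod (i - 18) (w.length : Int)) 0 +
                 (if 3 ≤ i then PySem.List.pyGetD (w.map pvInt1) (i - 3) 0 else 0) = 3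
            then '1' else '0') := by
    rw [PySem.List.foldl_append_singleton_eq_map, List.nil_append]
  rw [hA, hB]
  apply List.map_congr_left
  intro i hi
  rw [PySem.List.mem_pyRange_one] at hi
  obtain ⟨h0, hn⟩ := hi
  have h7 := pvIdxRot 7 w hw i h0 hn
  have h18 := pvIdxRot 18 w hw i h0 hn
  push_cast at h7 h18
  rw [h7, h18, pvIdxShift w i h0 hn]
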